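-- pv_equiv track=rewrite | github.com/Malik-Ubaydullaev/csv_basic_homework | get_first_column.py | get_first_column
-- ===== SOURCE A (Python) =====
-- def get_first_column(data):
--     """
--     Get the first column from a CSV file.
--     Args:
--         data(str): csv file.
--     Return:
--         list: First column.
--     """
--     columns = []
--     row = data.split('\n')
--     idx = 0
--     while idx < len(row)-1:
--         columns.append(row[idx].split(','))
--         idx += 1
--     first_column = []
--     idx = 0
--     while idx < len(columns):
--         first_column.append(columns[idx][0])
--         idx += 1
--     return first_column
-- ===== SOURCE B (Python) =====
-- def get_first_column(data):
--     """
--     Get the first column from a CSV file.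
--     Args:
--         data(str): csv file.
--     Return:
--         list: First column.
--     """
--     result = []
--     field = []
--     seen_comma = False
--     for ch in data:
--         if ch == '\n':
--             result.append(''.join(field))
--             field = []
--             seen_comma = False
--         elif ch == ',':
--             seen_comma = True
--         elif not seen_comma:
--             field.append(ch)
--     return result
-- ===== Notes on version B (the rewrite author's own statement) =====
-- stated objective: alternative
-- what changed: Replaces A's split-then-project pipeline (split into rows, split each row into a table of fields, then index column 0) with a single character-level state machine: one pass over the string with an accumulator (current field, comma-seen flag) that emits the field at each newline and never splits anything.
import Mathlib
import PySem

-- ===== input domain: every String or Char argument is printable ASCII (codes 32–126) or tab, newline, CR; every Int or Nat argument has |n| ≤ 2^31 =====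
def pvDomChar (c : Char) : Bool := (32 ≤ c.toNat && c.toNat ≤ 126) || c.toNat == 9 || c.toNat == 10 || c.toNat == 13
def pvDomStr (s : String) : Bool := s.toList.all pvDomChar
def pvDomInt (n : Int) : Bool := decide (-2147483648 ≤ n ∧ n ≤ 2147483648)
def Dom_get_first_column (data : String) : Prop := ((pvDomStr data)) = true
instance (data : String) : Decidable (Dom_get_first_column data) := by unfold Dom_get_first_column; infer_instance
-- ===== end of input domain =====

-- B replaces A's split-then-project pipeline with a single character-level state machine
-- (emit the pre-comma field at each newline); same cost, a genuinely different traversal.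


-- ===== PORT A =====
def get_first_column (data : String) : List String :=
  let row := (PySem.Str.split? data "\n").getD []
  let columns := (PySem.List.pyRange 0 ((row.length : Int) - 1) 1).foldl
      (fun acc i => acc ++ [(PySem.Str.split? (PySem.List.pyGetD row i "") ",").getD []]) []
  (PySem.List.pyRange 0 ((columns.length : Int)) 1).foldl
      (fun acc i => acc ++ [PySem.List.pyGetD (PySem.List.pyGetD columns i []) 0 ""]) []

-- ===== PORT B =====
-- one pass over the characters; state = (emitted rows, current field, comma-seen flag)
def get_first_column_alt (data : String) : List String :=
  (data.toList.foldl
    (fun (st : List String × List Char × Bool) ch =>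
      if ch = '\n' then (st.1 ++ [String.ofList st.2.1], [], false)
      else if ch = ',' then (st.1, st.2.1, true)
      else if st.2.2 = false then (st.1, st.2.1 ++ [ch], false)
      else st)
    ([], [], false)).1

-- ===== PRECONDITION & SPEC =====
def Spec_get_first_column (data : String) (out : List String) : Prop := out = get_first_column_alt data
instance (data : String) (out : List String) : Decidable (Spec_get_first_column data out) := by unfold Spec_get_first_column; infer_instance

-- ===== CLAIM (what is proved, stated in full; the proofs are below) =====
def Claim_equal_get_first_column : Prop := ∀ (data : String), Dom_get_first_column data → Spec_get_first_column data (get_first_column data)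

-- ===== LEMMAS AND PROOFS =====

-- A's index-while loop 'for idx in range(n): out.append(g(rows[idx]))' is map g over take n.
lemma pv_foldl_range_map {α β : Type} (g : α → β) (d : α) :
    ∀ (n : Nat) (rows : List α) (acc : List β), n ≤ rows.length →
      (PySem.List.pyRange 0 (n : Int) 1).foldl
          (fun acc i => acc ++ [g (PySem.List.pyGetD rows i d)]) acc
        = acc ++ (rows.take n).map g := by
  intro n
  induction n with
  | zero => intro rows acc _; simp [PySem.List.pyRange]
  | succ n ih =>
    intro rows acc h
    have hsplit : PySem.List.pyRange 0 ((n + 1 : Nat) : Int) 1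
        = PySem.List.pyRange 0 (n : Int) 1 ++ PySem.List.pyRange (n : Int) ((n + 1 : Nat) : Int) 1 := by
      exact PySem.List.pyRange_one_append 0 (n : Int) ((n + 1 : Nat) : Int) (by positivity) (by omega)
    have hone : PySem.List.pyRange (n : Int) ((n + 1 : Nat) : Int) 1 = [(n : Int)] := by
      have := PySem.List.pyRange_one_cons (a := (n : Int)) (b := ((n + 1 : Nat) : Int)) (by push_cast; omega)
      rw [this]
      have : PySem.List.pyRange ((n : Int) + 1) ((n + 1 : Nat) : Int) 1 = [] := by
        simp [PySem.List.pyRange]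
      simp
    rw [hsplit, hone, List.foldl_append, ih rows acc (by omega)]
    have hn : n < rows.length := by omega
    have : PySem.List.pyGetD rows (n : Int) d = rows[n] := by
      rw [PySem.List.pyGetD_natCast, List.getD_eq_getElem?_getD, List.getElem?_eq_getElem hn]
      rfl
    simp only [List.foldl_cons, List.foldl_nil, this]
    rw [List.take_add_one, List.getElem?_eq_getElem hn]
    simp only [List.map_append, Option.toList_some, List.map_cons, List.map_nil, List.append_assoc]

-- the projection g applied to each kept row
def pvG (cs : List Char) : String := String.ofList (cs.takeWhile (fun ch => ch ≠ ','))

-- recursive specification of B's state machine on a character list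
def pvEmit : List Char → List Char → Bool → List String
  | [], _, _ => []
  | c :: rest, field, seen =>
    if c = '\n' then String.ofList field :: pvEmit rest [] false
    else if c = ',' then pvEmit rest field true
    else if seen = false then pvEmit rest (field ++ [c]) false
    else pvEmit rest field seen

-- B's foldl accumulates exactly pvEmit
lemma pv_foldl_emit : ∀ (l : List Char) (res : List String) (field : List Char) (seen : Bool),
    (l.foldl
      (fun (st : List String × List Char × Bool) ch =>
        if ch = '\n' then (st.1 ++ [String.ofList st.2.1], [], false)
        else if ch = ',' then (st.1, st.2.1, true)
        else if st.2.2 = false then (st.1, st.2.1 ++ [ch], false)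
        else st)
      (res, field, seen)).1 = res ++ pvEmit l field seen := by
  intro l
  induction l with
  | nil => intro res field seen; simp [pvEmit]
  | cons c rest ih =>
    intro res field seen
    simp only [List.foldl_cons, pvEmit]
    by_cases h1 : c = '\n'
    · simp [h1, ih]
    · by_cases h2 : c = ','
      · simp [h2, ih]
      · by_cases h3 : seen = false
        · simp [h1, h2, h3, ih]
        · simp [h1, h2, h3, ih]

-- takeWhile facts used by the state-machine invariant
lemma pv_tw_self (cur : List Char) (h : ',' ∉ cur) :
    cur.reverse.takeWhile (fun ch => ch ≠ ',') = cur.reverse := by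
  apply List.takeWhile_eq_self_iff.mpr
  intro x hx
  simp only [ne_eq, decide_eq_true_eq]
  intro hxe; exact h (hxe ▸ List.mem_reverse.mp hx)

lemma pv_tw_app_mem (cur : List Char) (x : Char) (h : ',' ∈ cur) :
    (cur.reverse ++ [x]).takeWhile (fun ch => ch ≠ ',')
      = cur.reverse.takeWhile (fun ch => ch ≠ ',') := by
  rw [List.takeWhile_append, if_neg]
  intro hlen
  have hpref := (List.takeWhile_prefix (l := cur.reverse) (fun ch => ch ≠ ',')).eq_of_length hlen
  have := List.takeWhile_eq_self_iff.mp hpref ',' (List.mem_reverse.mpr h)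
  simp at this

lemma pv_tw_app_not (cur : List Char) (x : Char) (h : ',' ∉ cur) :
    (cur.reverse ++ [x]).takeWhile (fun ch => ch ≠ ',')
      = cur.reverse ++ [x].takeWhile (fun ch => ch ≠ ',') := by
  rw [List.takeWhile_append, if_pos (by rw [pv_tw_self cur h])]

-- splitOn.go, projected through dropLast and pvG, is pvEmit, given the field/seen invariant.
lemma pv_go_emit : ∀ (fuel : Nat) (l cur : List Char) (field : List Char) (seen : Bool)
    (acc : List (List Char)), l.length ≤ fuel →
    (field = (cur.reverse.takeWhile (fun ch => ch ≠ ','))) →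
    (seen = false → (',' ∉ cur)) →
    (seen = true → ',' ∈ cur) →
    ((PySem.Chars.splitOn.go ['\n'] fuel l cur acc).dropLast).map pvG
      = acc.reverse.map pvG ++ pvEmit l field seen := by
  intro fuel
  induction fuel with
  | zero =>
    intro l cur field seen acc h _ _ _
    have : l = [] := List.eq_nil_of_length_eq_zero (by omega)
    subst this
    simp [PySem.Chars.splitOn.go, pvEmit]
  | succ fuel ih =>
    intro l cur field seen acc h hf h0 h1
    cases l with
    | nil =>
      simp [PySem.Chars.splitOn.go, pvEmit]
    | cons c rest =>
      simp only [pvEmit]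
      by_cases hc : c = '\n'
      · subst hc
        have hstep : PySem.Chars.splitOn.go ['\n'] (fuel+1) ('\n' :: rest) cur acc
            = PySem.Chars.splitOn.go ['\n'] fuel rest [] (cur.reverse :: acc) := by
          simp [PySem.Chars.splitOn.go, List.isPrefixOf]
        rw [hstep, ih rest [] [] false (cur.reverse :: acc) (by simpa using h) (by simp)
            (by simp) (by simp)]
        have hfield : pvG cur.reverse = String.ofList field := by
          unfold pvG
          cases seen with
          | false => rw [pv_tw_self cur (h0 rfl), hf, pv_tw_self cur (h0 rfl)]
          | true => rw [hf]
        simp [hfield]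
      · by_cases hc2 : c = ','
        · subst hc2
          have hstep : PySem.Chars.splitOn.go ['\n'] (fuel+1) (',' :: rest) cur acc
              = PySem.Chars.splitOn.go ['\n'] fuel rest (',' :: cur) acc := by
            simp [PySem.Chars.splitOn.go, List.isPrefixOf]
          rw [hstep, ih rest (',' :: cur) field true acc (by simpa using h) ?_ (by simp)
              (by simp)]
          · simp [hc]
          · -- field = takeWhile (≠',') (cur.reverse ++ [','])
            rw [List.reverse_cons]
            cases seen with
            | false =>
              rw [pv_tw_app_not cur ',' (h0 rfl)]
              simp only [hf, pv_tw_self cur (h0 rfl)]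
              simp
            | true =>
              rw [pv_tw_app_mem cur ',' (h1 rfl)]; exact hf
        · have hpre : ['\n'].isPrefixOf (c :: rest) = false := by
            simp [List.isPrefixOf]
            exact fun hh => (hc hh.symm).elim
          have hstep : PySem.Chars.splitOn.go ['\n'] (fuel+1) (c :: rest) cur acc
              = PySem.Chars.splitOn.go ['\n'] fuel rest (c :: cur) acc := by
            simp only [PySem.Chars.splitOn.go, hpre]
            rfl
          rw [hstep]
          cases seen with
          | false =>
            rw [ih rest (c :: cur) (field ++ [c]) false acc (by simpa using h) ?_ ?_ (by simp)]
            · simp [hc, hc2]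
            · rw [List.reverse_cons, pv_tw_app_not cur c (h0 rfl)]
              simp only [hf, pv_tw_self cur (h0 rfl)]
              simp [hc2]
            · intro _
              simp only [List.mem_cons]
              rintro (hh | hh)
              · exact hc2 hh.symm
              · exact (h0 rfl) hh
          | true =>
            rw [ih rest (c :: cur) field true acc (by simpa using h) ?_ (by simp) ?_]
            · simp [hc, hc2]
            · rw [List.reverse_cons, pv_tw_app_mem cur c (h1 rfl)]; exact hf
            · intro _; exact List.mem_cons_of_mem _ (h1 rfl)

-- Structure of split-by-single-char: the first produced piece is the text before the first c.
lemma pv_go_single (c : Char) :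
    ∀ (fuel : Nat) (l cur : List Char) (acc : List (List Char)), l.length ≤ fuel →
      ∃ tail, PySem.Chars.splitOn.go [c] fuel l cur acc
        = acc.reverse ++ (cur.reverse ++ l.takeWhile (fun ch => ch ≠ c)) :: tail := by
  intro fuel
  induction fuel with
  | zero =>
    intro l cur acc h
    have : l = [] := List.eq_nil_of_length_eq_zero (by omega)
    subst this
    exact ⟨[], by simp [PySem.Chars.splitOn.go]⟩
  | succ fuel ih =>
    intro l cur acc h
    cases l with
    | nil => exact ⟨[], by simp [PySem.Chars.splitOn.go]⟩
    | cons c' rest =>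
      by_cases hc : c' = c
      · subst hc
        obtain ⟨tail, htail⟩ := ih rest [] (cur.reverse :: acc) (by simpa using h)
        refine ⟨rest.takeWhile (fun ch => ch ≠ c') :: tail, ?_⟩
        have hstep : PySem.Chars.splitOn.go [c'] (fuel+1) (c' :: rest) cur acc
            = PySem.Chars.splitOn.go [c'] fuel rest [] (cur.reverse :: acc) := by
          simp [PySem.Chars.splitOn.go, List.isPrefixOf]
        rw [hstep, htail]
        simp
      · obtain ⟨tail, htail⟩ := ih rest (c' :: cur) acc (by simpa using h)
        refine ⟨tail, ?_⟩
        have hpre : [c].isPrefixOf (c' :: rest) = false := by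
          simp [List.isPrefixOf]
          exact fun hh => (hc hh.symm).elim
        simp only [PySem.Chars.splitOn.go, hpre]
        rw [htail]
        simp [hc]

lemma pv_splitOn_head (c : Char) (s : List Char) :
    ∃ tail, PySem.Chars.splitOn s [c] = (s.takeWhile (fun ch => ch ≠ c)) :: tail := by
  obtain ⟨tail, htail⟩ := pv_go_single c (s.length + 1) s [] [] (by omega)
  exact ⟨tail, by simpa [PySem.Chars.splitOn] using htail⟩

-- columns[idx][0] for a split row is the row's text before its first comma.
lemma pv_first_field (r : String) :
    PySem.List.pyGetD ((PySem.Str.split? r ",").getD []) 0 ""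
      = String.ofList (r.toList.takeWhile (fun ch => ch ≠ ',')) := by
  obtain ⟨tail, htail⟩ := pv_splitOn_head ',' r.toList
  have hsep : ("," : String).toList = [','] := by decide
  have : PySem.Str.split? r "," = some ((PySem.Chars.splitOn r.toList [',']).map String.ofList) := by
    simp [PySem.Str.split?, PySem.Chars.split?, hsep]
  rw [this, Option.getD_some, htail]
  have h0 : ((0 : Int)) = ((0 : Nat) : Int) := rfl
  rw [h0, PySem.List.pyGetD_natCast]
  simp

-- B equals dropLast-then-project over the line split.
lemma pv_alt_eq (data : String) :
    get_first_column_alt data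
      = ((PySem.Chars.splitOn data.toList ['\n']).dropLast).map pvG := by
  unfold get_first_column_alt
  rw [pv_foldl_emit data.toList [] [] false]
  rw [PySem.Chars.splitOn]
  rw [pv_go_emit (data.toList.length + 1) data.toList [] [] false [] (by omega) (by simp)
      (by simp) (by simp)]
  simp

-- ===== VERDICT =====
theorem get_first_column_spec : Claim_equal_get_first_column := by
  intro data _
  unfold Spec_get_first_column get_first_column
  dsimp only
  set L := (PySem.Str.split? data "\n").getD [] with hL
  have hLval : L = (PySem.Chars.splitOn data.toList ['\n']).map String.ofList := by
    rw [hL]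
    have hsep : ("\n" : String).toList = ['\n'] := by decide
    simp [PySem.Str.split?, PySem.Chars.split?, hsep]
  by_cases hnil : L = []
  · have : (PySem.Chars.splitOn data.toList ['\n']) = [] := by
      rcases h : PySem.Chars.splitOn data.toList ['\n'] with _ | _
      · rfl
      · rw [hLval, h] at hnil; simp at hnil
    rw [pv_alt_eq, this]
    simp [hnil, PySem.List.pyRange]
  · have hlen : 1 ≤ L.length := List.length_pos_of_ne_nil hnil
    have hcast : ((L.length : Int) - 1) = (((L.length - 1 : Nat)) : Int) := by omega
    rw [hcast, pv_foldl_range_map (fun r => (PySem.Str.split? r ",").getD []) "" (L.length - 1) L [] (by omega)]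
    rw [pv_foldl_range_map (fun cl => PySem.List.pyGetD cl 0 "") ([] : List String) _ _ [] (le_refl _)]
    simp only [List.nil_append, List.take_length, List.map_map, ← List.dropLast_eq_take]
    rw [pv_alt_eq, hLval, ← List.map_dropLast, List.map_map]
    apply List.map_congr_left
    intro r _
    show PySem.List.pyGetD ((PySem.Str.split? (String.ofList r) ",").getD []) 0 "" = pvG r
    rw [pv_first_field]
    unfold pvG
    simp
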